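-- pv_equiv track=rewrite | github.com/Volpestyle/vuhlp-code | internal/agent/tools.py | _extract_last_json_object
-- ===== SOURCE A (Python) =====
-- from typing import Dict, List, Optional, Protocol
--
-- def _extract_last_json_object(value: str) -> Optional[str]:
--     depth = 0
--     end = -1
--     for i in range(len(value) - 1, -1, -1):
--         ch = value[i]
--         if ch == "}":
--             if depth == 0:
--                 end = i
--             depth += 1
--             continue
--         if ch == "{":
--             if depth > 0:
--                 depth -= 1
--                 if depth == 0 and end != -1:
--                     return value[i : end + 1]
--     return None
-- ===== SOURCE B (Python) =====
-- def _extract_last_json_object(value):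
--     stack = []
--     result = None
--     for i, ch in enumerate(value):
--         if ch == "{":
--             stack.append(i)
--         elif ch == "}":
--             if stack:
--                 result = value[stack.pop(): i + 1]
--             else:
--                 result = None
--     return result
-- ===== Notes on version B (the rewrite author's own statement) =====
-- stated objective: idiomatic
-- what changed: Replaced the backward depth-counting scan with a single forward pass keeping an explicit stack of the indices of unmatched opening braces, updating the result at every closing brace (pop then slice; on an empty stack the result is reset to None).
import Mathlib
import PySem

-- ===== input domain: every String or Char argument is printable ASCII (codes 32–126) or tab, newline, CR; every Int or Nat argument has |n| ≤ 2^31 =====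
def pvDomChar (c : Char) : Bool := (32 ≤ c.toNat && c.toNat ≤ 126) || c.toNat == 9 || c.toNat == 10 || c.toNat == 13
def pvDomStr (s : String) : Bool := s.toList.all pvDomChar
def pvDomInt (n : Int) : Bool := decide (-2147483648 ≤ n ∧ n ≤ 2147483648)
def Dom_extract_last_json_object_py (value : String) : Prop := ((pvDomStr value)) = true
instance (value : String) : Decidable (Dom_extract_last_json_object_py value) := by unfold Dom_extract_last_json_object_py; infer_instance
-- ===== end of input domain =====

-- B replaces A's backward depth-counting scan with a forward pass over an explicit stack of the indices of unmatched opening braces (idiomatic, same cost).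

-- ===== PORT A =====
-- literal port of A's 'for i in range(len(value)-1, -1, -1)' loop with early return
def aLoop (value : String) : List Int → Int → Int → Option String
  | [], _, _ => none
  | i :: rest, depth, end_ =>
    match PySem.Str.pyGet? value i with
    | none => none   -- unreachable: every i produced by the range is a valid index
    | some ch =>
      if ch = '}' then
        aLoop value rest (depth + 1) (if depth = 0 then i else end_)
      else if ch = '{' then
        if depth > 0 then
          if depth - 1 = 0 ∧ end_ ≠ -1 then
            some (PySem.Str.slice value (some i) (some (end_ + 1)))
          else aLoop value rest (depth - 1) end_
        else aLoop value rest depth end_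
      else aLoop value rest depth end_

def extract_last_json_object_py (value : String) : Option String :=
  aLoop value (PySem.List.pyRange (PySem.Str.len value - 1) (-1) (-1)) 0 (-1)

-- ===== PORT B =====
-- literal port of Source B: one forward pass over enumerate(value), stack of indices of unmatched '{'
def bStep (value : String) (st : List Int × Option String) (ic : Int × Char) : List Int × Option String :=
  if ic.2 = '{' then (ic.1 :: st.1, st.2)
  else if ic.2 = '}' then
    match st.1 with
    | [] => ([], none)
    | k :: s => (s, some (PySem.Str.slice value (some k) (some (ic.1 + 1))))
  else st

def extract_last_json_object_py_alt (value : String) : Option String :=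
  ((PySem.List.enumerate value.toList 0).foldl (bStep value) ([], none)).2

-- ===== PRECONDITION & SPEC =====
def Spec_extract_last_json_object_py (value : String) (out : Option String) : Prop := out = extract_last_json_object_py_alt value
instance (value : String) (out : Option String) : Decidable (Spec_extract_last_json_object_py value out) := by unfold Spec_extract_last_json_object_py; infer_instance

-- ===== CLAIM (what is proved, stated in full; the proofs are below) =====
def Claim_equal_extract_last_json_object_py : Prop := ∀ (value : String), Dom_extract_last_json_object_py value → Spec_extract_last_json_object_py value (extract_last_json_object_py value)

-- ===== LEMMAS AND PROOFS =====

-- aLoop with the character already paired with its index (proof-side twin of aLoop)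
def aAux (value : String) : List (Int × Char) → Int → Int → Option String
  | [], _, _ => none
  | (i, ch) :: rest, depth, end_ =>
    if ch = '}' then
      aAux value rest (depth + 1) (if depth = 0 then i else end_)
    else if ch = '{' then
      if depth > 0 then
        if depth - 1 = 0 ∧ end_ ≠ -1 then
          some (PySem.Str.slice value (some i) (some (end_ + 1)))
        else aAux value rest (depth - 1) end_
      else aAux value rest depth end_
    else aAux value rest depth end_

-- the stack of unmatched '{' indices after processing a prefix (B's stack component)
def stk : List (Int × Char) → List Int :=
  List.foldl (fun s ic => if ic.2 = '{' then ic.1 :: s else if ic.2 = '}' then s.tail else s) []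

theorem aLoop_eq_aAux (value : String) (q : List (Int × Char))
    (h : ∀ x ∈ q, PySem.Str.pyGet? value x.1 = some x.2) (d e : Int) :
    aLoop value (q.map (·.1)) d e = aAux value q d e := by
  induction q generalizing d e with
  | nil => rfl
  | cons x rest ih =>
    obtain ⟨i, c⟩ := x
    have hx : PySem.Str.pyGet? value i = some c := h (i, c) (List.mem_cons_self ..)
    have hrest : ∀ x ∈ rest, PySem.Str.pyGet? value x.1 = some x.2 :=
      fun x hm => h x (List.mem_cons_of_mem _ hm)
    simp only [List.map_cons, aLoop, aAux, hx]
    split_ifs <;> simp [ih hrest]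

theorem enum_get (cs : List Char) : ∀ (s : Nat) (x : Int × Char),
    x ∈ PySem.List.enumerate cs (s : Int) → ∃ k : Nat, x.1 = ((s + k : Nat) : Int) ∧ cs[k]? = some x.2 := by
  induction cs with
  | nil => intro s x hx; simp [PySem.List.enumerate_nil] at hx
  | cons c cs ih =>
    intro s x hx
    rw [PySem.List.enumerate_cons] at hx
    rcases List.mem_cons.mp hx with h | h
    · exact ⟨0, by simp [h]⟩
    · have : ((s : Int) + 1) = ((s + 1 : Nat) : Int) := by push_cast; ring
      rw [this] at h
      obtain ⟨k, hk1, hk2⟩ := ih (s + 1) x h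
      refine ⟨k + 1, ?_, ?_⟩
      · rw [hk1]; congr 1; omega
      · simpa using hk2

-- characters after the last '}' change nothing in A's backward scan at depth 0
theorem aAux_skip (value : String) (q : List (Int × Char)) (hq : ∀ x ∈ q, x.2 ≠ '}') :
    ∀ rest, aAux value (q ++ rest) 0 (-1) = aAux value rest 0 (-1) := by
  induction q with
  | nil => intro rest; rfl
  | cons x t ih =>
    intro rest
    obtain ⟨i, c⟩ := x
    have hc : c ≠ '}' := hq (i, c) (List.mem_cons_self ..)
    have ht : ∀ x ∈ t, x.2 ≠ '}' := fun x hm => hq x (List.mem_cons_of_mem _ hm)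
    simp only [List.cons_append, aAux, if_neg hc]
    rw [if_neg (show ¬((0 : Int) > 0) by norm_num), ite_self]
    exact ih ht rest

-- MAIN: A's backward scan at depth d+1 returns the slice from the d-th stack entry of the forward stack
theorem aAux_main (value : String) (j : Int) (hj : 0 ≤ j) :
    ∀ (l : List (Int × Char)) (d : Nat),
      aAux value l.reverse ((d : Int) + 1) j =
        match (stk l)[d]? with
        | some k => some (PySem.Str.slice value (some k) (some (j + 1)))
        | none => none := by
  intro l
  induction l using List.reverseRecOn with
  | nil => intro d; simp [aAux, stk]
  | append_singleton l' x ih =>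
    intro d
    obtain ⟨i, c⟩ := x
    have hstk : stk (l' ++ [(i, c)]) =
        (if c = '{' then i :: stk l' else if c = '}' then (stk l').tail else stk l') := by
      simp [stk, List.foldl_append]
    rw [List.reverse_append, List.reverse_singleton, List.singleton_append, hstk]
    by_cases hc1 : c = '}'
    · subst hc1
      have h0 : ¬((d : Int) + 1 = 0) := by positivity
      simp only [aAux, if_neg h0]
      have hcast : (d : Int) + 1 + 1 = ((d + 1 : Nat) : Int) + 1 := by push_cast; ring
      rw [hcast, ih (d + 1)]
      simp [List.getElem?_tail]
    · by_cases hc2 : c = '{'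
      · subst hc2
        simp only [aAux, if_neg (by decide : ¬('{' = '}')),
          if_pos (by positivity : (0 : Int) < (d : Int) + 1)]
        by_cases hd : d = 0
        · subst hd
          rw [if_pos (show ((0 : Nat) : Int) + 1 - 1 = 0 ∧ j ≠ -1 from ⟨by norm_num, by omega⟩)]
          simp
        · rw [if_neg (show ¬(((d : Nat) : Int) + 1 - 1 = 0 ∧ j ≠ -1) from by
            rintro ⟨h1, -⟩; omega)]
          have hcast : (d : Int) + 1 - 1 = ((d - 1 : Nat) : Int) + 1 := by
            have h1 : 1 ≤ d := Nat.one_le_iff_ne_zero.mpr hd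
            push_cast [h1]; ring
          rw [hcast, ih (d - 1)]
          have hd1 : d - 1 + 1 = d := Nat.succ_pred_eq_of_pos (Nat.pos_of_ne_zero hd)
          rcases d with - | d'
          · exact absurd rfl hd
          · simp
      · simp only [aAux, if_neg hc1, if_neg hc2]
        exact ih d

-- B's stack component is stk, independently of the result component
theorem bFold_fst (value : String) (l : List (Int × Char)) :
    ∀ (st : List Int) (r : Option String),
      (l.foldl (bStep value) (st, r)).1 =
        l.foldl (fun s ic => if ic.2 = '{' then ic.1 :: s else if ic.2 = '}' then s.tail else s) st := by
  induction l with
  | nil => intro st r; rfl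
  | cons x t ih =>
    intro st r
    obtain ⟨i, c⟩ := x
    simp only [List.foldl_cons, bStep]
    split_ifs with h1 h2
    · exact ih _ _
    · cases st <;> simp [ih]
    · exact ih _ _

-- B's result component is unchanged by characters that are not '}'
theorem bFold_snd_skip (value : String) (q : List (Int × Char)) (hq : ∀ x ∈ q, x.2 ≠ '}') :
    ∀ p : List Int × Option String, (q.foldl (bStep value) p).2 = p.2 := by
  induction q with
  | nil => intro p; rfl
  | cons x t ih =>
    intro p
    have hc : x.2 ≠ '}' := hq _ (by simp)
    have ht : ∀ y ∈ t, y.2 ≠ '}' := fun y hm => hq y (by simp [hm])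
    simp only [List.foldl_cons, bStep, if_neg hc]
    split_ifs <;> simp [ih ht]

-- every list splits at its last '}' (or has none)
theorem last_split (e : List (Int × Char)) :
    (∀ x ∈ e, x.2 ≠ '}') ∨
      ∃ l j r, e = l ++ (j, '}') :: r ∧ (∀ x ∈ r, x.2 ≠ '}') := by
  induction e with
  | nil => left; simp
  | cons x t ih =>
    rcases ih with h | ⟨l, j, r, h1, h2⟩
    · by_cases hx : x.2 = '}'
      · right
        obtain ⟨a, b⟩ := x
        exact ⟨[], a, t, by simp only [List.nil_append]; rw [show b = '}' from hx], h⟩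
      · left
        intro y hy
        rcases List.mem_cons.mp hy with rfl | hm
        · exact hx
        · exact h y hm
    · right
      exact ⟨x :: l, j, r, by simp [h1], h2⟩

-- ===== VERDICT (by name: the statement is the Claim_ definition above) =====
theorem extract_last_json_object_py_spec : Claim_equal_extract_last_json_object_py := by
  intro value _
  unfold Spec_extract_last_json_object_py extract_last_json_object_py extract_last_json_object_py_alt
  set cs := value.toList with hcs
  set e := PySem.List.enumerate cs 0 with he
  -- A's index list is the reverse of the enumerated indices
  have hrange : PySem.List.pyRange (PySem.Str.len value - 1) (-1) (-1) = (e.reverse).map (·.1) := by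
    rw [PySem.List.pyRange_neg_one_eq_reverse]
    have : (-1 : Int) + 1 = 0 := by ring
    rw [this]
    have hlen : PySem.Str.len value - 1 + 1 = (cs.length : Int) := by
      rw [PySem.Str.len_eq]; ring
    rw [hlen, List.map_reverse]
    have := PySem.List.map_fst_enumerate cs (0 : Int)
    simp only [zero_add] at this
    rw [← this]
  have hget : ∀ x ∈ e, PySem.Str.pyGet? value x.1 = some x.2 := by
    intro x hx
    obtain ⟨k, hk1, hk2⟩ := enum_get cs 0 x (by simpa using hx)
    simp only [Nat.zero_add] at hk1
    rw [hk1, PySem.Str.pyGet?_natCast, ← hcs, hk2]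
  rw [hrange, aLoop_eq_aAux value e.reverse (fun x hx => hget x (List.mem_reverse.mp hx)) 0 (-1)]
  rcases last_split e with hnone | ⟨l, j, r, hsplit, hr⟩
  · -- no '}' at all: both return none
    have hA : aAux value e.reverse 0 (-1) = none := by
      have := aAux_skip value e.reverse (fun x hx => hnone x (List.mem_reverse.mp hx)) []
      simpa using this
    have hB : (e.foldl (bStep value) ([], none)).2 = none :=
      bFold_snd_skip value e hnone ([], none)
    rw [hA, hB]
  · -- split at the last '}'
    have hj : 0 ≤ j := by
      obtain ⟨k, hk1, _⟩ := enum_get cs 0 (j, '}') (by rw [Nat.cast_zero, ← he, hsplit]; simp)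
      simp only [Nat.zero_add] at hk1
      have hk : j = (k : Int) := hk1
      omega
    have hrev : e.reverse = r.reverse ++ ((j, '}') :: l.reverse) := by
      rw [hsplit]; simp
    rw [hrev, aAux_skip value r.reverse (fun x hx => hr x (List.mem_reverse.mp hx))]
    have hstep : aAux value ((j, '}') :: l.reverse) 0 (-1) = aAux value l.reverse 1 j := by
      simp [aAux]
    rw [hstep]
    have hmain := aAux_main value j hj l 0
    simp only [Nat.cast_zero, zero_add] at hmain
    rw [hmain]
    -- B side
    rw [hsplit, List.foldl_append, List.foldl_cons]
    rw [bFold_snd_skip value r hr]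
    rw [show (stk l) = (l.foldl (bStep value) ([], none)).1 from by rw [bFold_fst]; rfl]
    cases hcase : (l.foldl (bStep value) ([], none)).1 with
    | nil => simp [bStep, hcase]
    | cons k s => simp [bStep, hcase]
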